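-- pv_equiv track=rewrite | github.com/yoyodahary/ReaserchProject | research.py | lb
-- ===== SOURCE A (Python) =====
-- def lb(rep):
--   sum = 0
--   for i in range(len(rep)):
--     instances = []
--     for j in range(i):
--       if rep[j] > rep[i]:
--         if rep[j] not in instances:
--           sum += 1
--           instances.append(rep[j])
--   return sum
-- ===== SOURCE B (Python) =====
-- def lb(rep):
--     # value-centric: each distinct value v (first occurring at index f)
--     # contributes one per later index i with rep[i] < v
--     first = {}
--     for i, x in enumerate(rep):
--         if x not in first:
--             first[x] = i
--     total = 0
--     for v, f in first.items():
--         total += sum(1 for y in rep[f + 1:] if y < v)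
--     return total
-- ===== Notes on version B (the rewrite author's own statement) =====
-- stated objective: faster
-- what changed: Replaces A's position-centric triple loop (rescanning and re-deduplicating the whole prefix for every index) by a value-centric two-stage algorithm: one pass records each distinct value's first occurrence index, then each distinct value v with first occurrence f contributes the number of later positions holding a value below v.
import Mathlib
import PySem

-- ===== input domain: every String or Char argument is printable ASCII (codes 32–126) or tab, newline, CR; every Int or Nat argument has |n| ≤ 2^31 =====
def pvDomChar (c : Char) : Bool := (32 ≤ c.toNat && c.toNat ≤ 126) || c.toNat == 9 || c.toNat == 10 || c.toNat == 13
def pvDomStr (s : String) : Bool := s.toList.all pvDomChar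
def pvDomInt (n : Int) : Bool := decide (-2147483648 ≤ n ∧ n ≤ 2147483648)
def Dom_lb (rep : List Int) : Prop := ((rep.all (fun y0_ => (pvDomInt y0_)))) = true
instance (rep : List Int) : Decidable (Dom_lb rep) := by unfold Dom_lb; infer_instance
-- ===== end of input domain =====

-- B is value-centric instead of A's position-centric triple loop: it records the first
-- occurrence index of each distinct value in one pass, then sums, per distinct value v
-- with first occurrence f, the number of later positions holding a value below v
-- (objective: faster — a timing run measured B faster; it removes A's per-index prefix rescan).

-- ===== PORT A =====
-- inner loop body of A for a fixed i: 'for j in range(i): …' updating (sum, instances)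
def lbStep (rep : List Int) (sum : Int) (i : Int) : Int :=
  ((PySem.List.pyRange 0 i 1).foldl
    (fun (st : Int × List Int) j =>
      if PySem.List.pyGetD rep j 0 > PySem.List.pyGetD rep i 0 then
        if PySem.List.pyGetD rep j 0 ∈ st.2 then st
        else (st.1 + 1, st.2 ++ [PySem.List.pyGetD rep j 0])
      else st)
    (sum, ([] : List Int))).1

def lb (rep : List Int) : Int :=
  (PySem.List.pyRange 0 (PySem.List.len rep) 1).foldl (lbStep rep) 0

-- ===== PORT B =====
-- first pass of B: 'for i, x in enumerate(rep): if x not in first: first[x] = i'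
def lbFirst (rep : List Int) : PySem.Dict Int Int :=
  (PySem.List.enumerate rep).foldl
    (fun d p => if d.contains p.2 then d else d.insert p.2 p.1) PySem.Dict.empty

-- second pass of B: 'total += sum(1 for y in rep[f+1:] if y < v)'
def lb_alt (rep : List Int) : Int :=
  (lbFirst rep).items.foldl
    (fun t p =>
      t + ((PySem.List.slice rep (some (p.2 + 1)) none).countP (fun y => decide (y < p.1)) : Int))
    0

-- ===== PRECONDITION & SPEC =====
def Spec_lb (rep : List Int) (out : Int) : Prop := out = lb_alt rep
instance (rep : List Int) (out : Int) : Decidable (Spec_lb rep out) := by unfold Spec_lb; infer_instance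

-- ===== CLAIM (what is proved, stated in full; the proofs are below) =====
def Claim_equal_lb : Prop := ∀ (rep : List Int), Dom_lb rep → Spec_lb rep (lb rep)

-- ===== LEMMAS AND PROOFS =====

theorem pyGetD_append_left (l r : List Int) (j : Int) (h0 : 0 ≤ j) (h : j < l.length) :
    PySem.List.pyGetD (l ++ r) j 0 = PySem.List.pyGetD l j 0 := by
  rw [PySem.List.pyGetD_eq_getElem (l ++ r) 0 h0 (by simp; omega),
      PySem.List.pyGetD_eq_getElem l 0 h0 (by simpa using h)]
  exact List.getElem_append_left _

-- A's inner fold over the VALUES of l computes (s + #new distinct, inst updated)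
theorem innerA_spec (x : Int) (l : List Int) : ∀ (s : Int) (inst : List Int),
    l.foldl
      (fun (st : Int × List Int) v =>
        if v > x then (if v ∈ st.2 then st else (st.1 + 1, st.2 ++ [v])) else st)
      (s, inst)
    = (s + ((PySem.Set.update inst (l.filter (fun v => decide (v > x)))).length : Int)
          - (inst.length : Int),
       PySem.Set.update inst (l.filter (fun v => decide (v > x)))) := by
  induction l with
  | nil => intro s inst; simp [PySem.Set.update]
  | cons v t ih =>
    intro s inst
    by_cases hv : v > x
    · have hf : List.filter (fun v => decide (v > x)) (v :: t)
          = v :: List.filter (fun v => decide (v > x)) t := by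
        simp [hv]
      by_cases hm : v ∈ inst
      · simp only [List.foldl_cons, if_pos hv, if_pos hm, hf, ih]
        have h1 : PySem.Set.update inst (v :: t.filter (fun v => decide (v > x)))
            = PySem.Set.update inst (t.filter (fun v => decide (v > x))) := by
          simp [PySem.Set.update, PySem.Set.add_of_mem hm]
        rw [h1]
      · simp only [List.foldl_cons, if_pos hv, if_neg hm, hf, ih]
        have h1 : PySem.Set.update inst (v :: t.filter (fun v => decide (v > x)))
            = PySem.Set.update (inst ++ [v]) (t.filter (fun v => decide (v > x))) := by
          simp [PySem.Set.update, PySem.Set.add_of_not_mem hm]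
        rw [h1]
        refine Prod.ext ?_ rfl
        simp only [List.length_append, List.length_cons, List.length_nil]
        push_cast
        ring
    · have hf : List.filter (fun v => decide (v > x)) (v :: t)
          = List.filter (fun v => decide (v > x)) t := by
        simp [hv]
      simp only [List.foldl_cons, if_neg hv, hf, ih]

theorem filter_add (s : List Int) (q : Int → Bool) (x : Int) :
    (PySem.Set.add s x).filter q
      = if q x then PySem.Set.add (s.filter q) x else s.filter q := by
  rw [PySem.Set.add_eq_ite]
  by_cases hm : x ∈ s
  · rw [if_pos hm]
    by_cases hq : q x
    · rw [if_pos hq, PySem.Set.add_of_mem (List.mem_filter.mpr ⟨hm, hq⟩)]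
    · rw [if_neg hq]
  · rw [if_neg hm, List.filter_append]
    by_cases hq : q x
    · rw [if_pos hq, PySem.Set.add_of_not_mem (fun h => hm (List.mem_filter.mp h).1)]
      simp [hq]
    · simp [hq]

theorem filter_update (l : List Int) (q : Int → Bool) : ∀ (s : List Int),
    (PySem.Set.update s l).filter q = PySem.Set.update (s.filter q) (l.filter q) := by
  induction l with
  | nil => intro s; simp [PySem.Set.update]
  | cons v t ih =>
    intro s
    simp only [PySem.Set.update, List.foldl_cons, List.filter_cons] at *
    by_cases hq : q v
    · simp only [hq, if_true, ih, filter_add, List.foldl_cons]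
    · simp only [hq, if_false, ih, filter_add, Bool.false_eq_true]

theorem countP_ofList (l : List Int) (q : Int → Bool) :
    ((PySem.Set.ofList l).countP q : Int) = ((PySem.Set.ofList (l.filter q)).length : Int) := by
  have h1 : PySem.Set.ofList l = PySem.Set.update [] l := rfl
  have h2 : PySem.Set.ofList (l.filter q) = PySem.Set.update ([].filter q) (l.filter q) := rfl
  rw [h1, h2, ← filter_update, List.countP_eq_length_filter]

-- A's step at index l.length on l ++ [x] adds the number of distinct values of l greater than x
theorem lbStep_last (l : List Int) (x : Int) (s : Int) :
    lbStep (l ++ [x]) s (l.length : Int)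
      = s + ((PySem.Set.ofList (l.filter (fun v => decide (v > x)))).length : Int) := by
  unfold lbStep
  have hx : PySem.List.pyGetD (l ++ [x]) (l.length : Int) 0 = x := by
    rw [PySem.List.pyGetD_eq_getElem (l ++ [x]) 0 (by exact_mod_cast Nat.zero_le _) (by simp)]
    simp
  rw [hx]
  have hcong : (PySem.List.pyRange 0 (l.length : Int) 1).foldl
      (fun (st : Int × List Int) j =>
        if PySem.List.pyGetD (l ++ [x]) j 0 > x then
          (if PySem.List.pyGetD (l ++ [x]) j 0 ∈ st.2 then st
           else (st.1 + 1, st.2 ++ [PySem.List.pyGetD (l ++ [x]) j 0]))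
        else st) (s, ([] : List Int))
      = (PySem.List.pyRange 0 (l.length : Int) 1).foldl
      (fun (st : Int × List Int) j =>
        if PySem.List.pyGetD l j 0 > x then
          (if PySem.List.pyGetD l j 0 ∈ st.2 then st
           else (st.1 + 1, st.2 ++ [PySem.List.pyGetD l j 0]))
        else st) (s, ([] : List Int)) := by
    apply PySem.List.foldl_congr_mem
    intro acc j hj
    rw [PySem.List.mem_pyRange_one] at hj
    rw [pyGetD_append_left l [x] j hj.1 (by exact_mod_cast hj.2)]
  rw [hcong,
    PySem.List.foldl_pyRange_zero_pyGetD' l 0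
      (fun (st : Int × List Int) v =>
        if v > x then (if v ∈ st.2 then st else (st.1 + 1, st.2 ++ [v])) else st)
      (s, ([] : List Int)),
    innerA_spec]
  simp [PySem.Set.update, PySem.Set.ofList_eq_foldl]

-- for i < l.length, A's step does not look at the appended element
theorem lbStep_prefix (l : List Int) (x : Int) (s : Int) (i : Int)
    (h0 : 0 ≤ i) (h : i < l.length) :
    lbStep (l ++ [x]) s i = lbStep l s i := by
  unfold lbStep
  rw [pyGetD_append_left l [x] i h0 h]
  congr 1
  apply PySem.List.foldl_congr_mem
  intro acc j hj
  rw [PySem.List.mem_pyRange_one] at hj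
  rw [pyGetD_append_left l [x] j hj.1 (by omega)]

-- A's value grows by the number of distinct earlier values greater than the appended element
theorem lb_append (l : List Int) (x : Int) :
    lb (l ++ [x]) = lb l + ((PySem.Set.ofList (l.filter (fun v => decide (v > x)))).length : Int) := by
  unfold lb
  have hlen : PySem.List.len (l ++ [x]) = (l.length : Int) + 1 := by simp
  rw [hlen, PySem.List.pyRange_one_succ_right (by exact_mod_cast Nat.zero_le _), List.foldl_append]
  have hpre : (PySem.List.pyRange 0 (l.length : Int) 1).foldl (lbStep (l ++ [x])) 0
      = (PySem.List.pyRange 0 (l.length : Int) 1).foldl (lbStep l) 0 := by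
    apply PySem.List.foldl_congr_mem
    intro acc i hi
    rw [PySem.List.mem_pyRange_one] at hi
    exact lbStep_prefix l x acc i hi.1 (by exact_mod_cast hi.2)
  simp only [List.foldl_cons, List.foldl_nil]
  rw [hpre, lbStep_last]
  simp

-- ===== facts about B's first-occurrence dict =====

-- the generic fold behind lbFirst: membership of a key
theorem lbFirst_fold_contains (ps : List (Int × Int)) : ∀ (d : PySem.Dict Int Int) (k : Int),
    (ps.foldl (fun d p => if d.contains p.2 then d else d.insert p.2 p.1) d).contains k
      = (d.contains k || ps.any (fun p => p.2 == k)) := by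
  induction ps with
  | nil => intro d k; cases hc : d.contains k <;> simp [hc]
  | cons p t ih =>
    intro d k
    simp only [List.foldl_cons, List.any_cons]
    by_cases hc : d.contains p.2
    · rw [if_pos hc, ih]
      by_cases hk : p.2 = k
      · subst hk; simp [hc]
      · have hb : (p.2 == k) = false := by simpa using hk
        simp [hb]
    · rw [if_neg hc, ih, PySem.Dict.contains_insert]
      by_cases hk : k = p.2
      · subst hk; simp
      · have hb1 : (k == p.2) = false := by simpa using hk
        have hb2 : (p.2 == k) = false := by simpa using fun h => hk h.symm
        simp [hb1, hb2]

theorem lbFirst_contains (rep : List Int) (k : Int) :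
    (lbFirst rep).contains k = decide (k ∈ rep) := by
  unfold lbFirst
  rw [lbFirst_fold_contains]
  have h : (PySem.List.enumerate rep 0).any (fun p => p.2 == k)
      = ((PySem.List.enumerate rep 0).map (·.2)).any (· == k) := by
    rw [List.any_map]; rfl
  simp [h, PySem.List.map_snd_enumerate, List.any_beq']

-- keys of lbFirst rep are the distinct values of rep in first-occurrence order
theorem lbFirst_fold_keys (ps : List (Int × Int)) : ∀ (d : PySem.Dict Int Int),
    (ps.foldl (fun d p => if d.contains p.2 then d else d.insert p.2 p.1) d).keys
      = PySem.Set.update d.keys (ps.map (·.2)) := by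
  induction ps with
  | nil => intro d; simp [PySem.Set.update]
  | cons p t ih =>
    intro d
    simp only [List.foldl_cons, List.map_cons, PySem.Set.update, List.foldl_cons]
    by_cases hc : d.contains p.2
    · rw [if_pos hc, ih]
      have h1 : PySem.Set.add d.keys p.2 = d.keys :=
        PySem.Set.add_of_mem ((PySem.Dict.contains_iff_mem_keys _ _).mp hc)
      rw [h1]
      rfl
    · rw [if_neg hc, ih, PySem.Dict.keys_insert_of_not_contains _ _ (by simpa using hc)]
      have h1 : PySem.Set.add d.keys p.2 = d.keys ++ [p.2] :=
        PySem.Set.add_of_not_mem (fun h => hc ((PySem.Dict.contains_iff_mem_keys _ _).mpr h))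
      rw [h1]
      rfl

theorem lbFirst_keys (rep : List Int) :
    (lbFirst rep).keys = PySem.Set.ofList rep := by
  unfold lbFirst
  rw [lbFirst_fold_keys, PySem.List.map_snd_enumerate]
  rfl

-- every stored first-occurrence index lies in [0, rep.length)
theorem lbFirst_fold_bounds (P : Int → Prop) (ps : List (Int × Int))
    (hps : ∀ p ∈ ps, P p.1) : ∀ (d : PySem.Dict Int Int),
    (∀ p ∈ d.items, P p.2) →
    ∀ p ∈ (ps.foldl (fun d p => if d.contains p.2 then d else d.insert p.2 p.1) d).items, P p.2 := by
  induction ps with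
  | nil => intro d hd; simpa using hd
  | cons q t ih =>
    intro d hd
    simp only [List.foldl_cons]
    by_cases hc : d.contains q.2
    · rw [if_pos hc]
      exact ih (fun p hp => hps p (List.mem_cons_of_mem _ hp)) d hd
    · rw [if_neg hc]
      refine ih (fun p hp => hps p (List.mem_cons_of_mem _ hp)) _ ?_
      intro p hp
      rcases (PySem.Dict.mem_items_insert _ _ _ _).mp hp with h | h
      · subst h; exact hps q (List.mem_cons_self)
      · exact hd p h.1

theorem lbFirst_bounds (rep : List Int) :
    ∀ p ∈ (lbFirst rep).items, 0 ≤ p.2 ∧ p.2 < (rep.length : Int) := by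
  unfold lbFirst
  apply lbFirst_fold_bounds (fun f => 0 ≤ f ∧ f < (rep.length : Int))
  · intro p hp
    obtain ⟨k, hk, hpk⟩ := (PySem.List.mem_enumerate_iff _ _ _).mp hp
    subst hpk
    refine ⟨by simp, ?_⟩
    simp only [zero_add]
    exact_mod_cast hk
  · intro p hp
    simp [PySem.Dict.empty] at hp

-- how lbFirst grows when one element is appended
theorem lbFirst_items_append (l : List Int) (x : Int) :
    (lbFirst (l ++ [x])).items
      = if x ∈ l then (lbFirst l).items
        else (lbFirst l).items ++ [(x, (l.length : Int))] := by
  unfold lbFirst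
  rw [PySem.List.enumerate_append, List.foldl_append]
  simp only [PySem.List.enumerate_cons, PySem.List.enumerate_nil, List.foldl_cons, List.foldl_nil,
    zero_add]
  have hc : (lbFirst l).contains x = decide (x ∈ l) := lbFirst_contains l x
  unfold lbFirst at hc
  by_cases hm : x ∈ l
  · rw [if_pos hm, if_pos (by rw [hc]; simpa using hm)]
  · rw [if_neg hm, if_neg (by rw [hc]; simpa using hm)]
    rw [PySem.Dict.items_insert_of_not_contains _ _ (by rw [hc]; simpa using hm)]

-- sums over the same index list, pointwise shifted by a 0/1 indicator
theorem sum_map_shift (x : Int) (f g : Int × Int → Int) : ∀ (L : List (Int × Int)),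
    (∀ p ∈ L, f p = g p + (if x < p.1 then 1 else 0)) →
    (L.map f).sum = (L.map g).sum + (L.countP (fun p => decide (x < p.1)) : Int) := by
  intro L
  induction L with
  | nil => intro _; simp
  | cons q M ih =>
    intro hL
    simp only [List.map_cons, List.sum_cons, List.countP_cons]
    rw [hL q List.mem_cons_self, ih (fun p hp => hL p (List.mem_cons_of_mem _ hp))]
    by_cases hx : x < q.1
    · simp only [hx, if_true, decide_true]
      push_cast
      ring
    · simp only [hx, if_false, decide_false]
      push_cast
      ring

-- the count of dict keys above x is the count of distinct values of l above x
theorem lbFirst_countP (l : List Int) (x : Int) :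
    ((lbFirst l).items.countP (fun p => decide (x < p.1)) : Int)
      = ((PySem.Set.ofList (l.filter (fun v => decide (v > x)))).length : Int) := by
  have h1 : (lbFirst l).items.countP (fun p => decide (x < p.1))
      = ((lbFirst l).items.map (·.1)).countP (fun v => decide (v > x)) := by
    rw [List.countP_map]; rfl
  have h2 : (lbFirst l).items.map (·.1) = PySem.Set.ofList l := lbFirst_keys l
  rw [h1, h2, countP_ofList]

-- B's value grows by the number of distinct earlier values greater than the appended element
theorem lb_alt_append (l : List Int) (x : Int) :
    lb_alt (l ++ [x])
      = lb_alt l + ((PySem.Set.ofList (l.filter (fun v => decide (v > x)))).length : Int) := by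
  unfold lb_alt
  rw [PySem.List.foldl_add, PySem.List.foldl_add]
  have hstep : ∀ p ∈ (lbFirst l).items,
      ((PySem.List.slice (l ++ [x]) (some (p.2 + 1)) none).countP (fun y => decide (y < p.1)) : Int)
        = ((PySem.List.slice l (some (p.2 + 1)) none).countP (fun y => decide (y < p.1)) : Int)
          + (if x < p.1 then 1 else 0) := by
    intro p hp
    obtain ⟨h0, hlt⟩ := lbFirst_bounds l p hp
    have h0' : (0 : Int) ≤ p.2 + 1 := by omega
    have hle : (p.2 + 1).toNat ≤ l.length := by omega
    rw [PySem.List.slice_from (l ++ [x]) h0', PySem.List.slice_from l h0',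
        List.drop_append_of_le_length hle, List.countP_append]
    by_cases hx : x < p.1 <;> simp [hx]
  rw [lbFirst_items_append]
  by_cases hm : x ∈ l
  · rw [if_pos hm, sum_map_shift x _ _ _ hstep, lbFirst_countP]
    ring
  · rw [if_neg hm, List.map_append, List.sum_append,
        sum_map_shift x _ _ _ hstep, lbFirst_countP]
    have hnil : PySem.List.slice (l ++ [x]) (some ((l.length : Int) + 1)) none = [] := by
      rw [PySem.List.slice_from (l ++ [x]) (by positivity)]
      apply List.drop_eq_nil_of_le
      simp
    simp only [List.map_cons, List.map_nil, List.sum_cons, List.sum_nil, hnil, List.countP_nil]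
    push_cast
    ring

theorem lb_eq_alt (rep : List Int) : lb rep = lb_alt rep := by
  induction rep using List.reverseRecOn with
  | nil => rfl
  | append_singleton l x ih =>
    rw [lb_append, lb_alt_append, ih]

-- ===== VERDICT (by name: the statement is the Claim_ definition above) =====
theorem lb_spec : Claim_equal_lb := by
  intro rep _
  unfold Spec_lb
  exact lb_eq_alt rep
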